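-- pv_equiv track=rewrite | github.com/vuhoangminh/vqa_medical | datasets/utils/qa_utils.py | get_ans_major_tool
-- ===== SOURCE A (Python) =====
-- def compute_area_bb_tool(xmin1, xmax1, ymin1, ymax1):
--     return (xmax1-xmin1)*(ymax1-ymin1)
--
-- def get_ans_major_tool(boxes):
--     if len(boxes) == 1:
--         return boxes[0][0].lower()
--     if len(boxes) > 1:
--         areas = list()
--         for i in range(len(boxes)):
--             tool, xmin1, xmax1, ymin1, ymax1 = boxes[i]
--             areas.append(compute_area_bb_tool(xmin1, xmax1, ymin1, ymax1))
--         index_max_area = areas.index(max(areas))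
--         return boxes[index_max_area][0].lower()
-- ===== SOURCE B (Python) =====
-- def get_ans_major_tool(boxes):
--     if not boxes:
--         return None
--     ranked = sorted(boxes, key=lambda b: (b[2] - b[1]) * (b[4] - b[3]), reverse=True)
--     return ranked[0][0].lower()
-- ===== Notes on version B (the rewrite author's own statement) =====
-- stated objective: alternative
-- what changed: Replaces A's running pipeline (build areas list, max(areas), areas.index lookup, re-index boxes) with a stable descending sort of the boxes by area and taking the head of the ranked list; stability of sorted makes the head the first maximal-area box, matching A's first-index tie behaviour, with an explicit empty guard matching A's implicit None.
import Mathlib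
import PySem

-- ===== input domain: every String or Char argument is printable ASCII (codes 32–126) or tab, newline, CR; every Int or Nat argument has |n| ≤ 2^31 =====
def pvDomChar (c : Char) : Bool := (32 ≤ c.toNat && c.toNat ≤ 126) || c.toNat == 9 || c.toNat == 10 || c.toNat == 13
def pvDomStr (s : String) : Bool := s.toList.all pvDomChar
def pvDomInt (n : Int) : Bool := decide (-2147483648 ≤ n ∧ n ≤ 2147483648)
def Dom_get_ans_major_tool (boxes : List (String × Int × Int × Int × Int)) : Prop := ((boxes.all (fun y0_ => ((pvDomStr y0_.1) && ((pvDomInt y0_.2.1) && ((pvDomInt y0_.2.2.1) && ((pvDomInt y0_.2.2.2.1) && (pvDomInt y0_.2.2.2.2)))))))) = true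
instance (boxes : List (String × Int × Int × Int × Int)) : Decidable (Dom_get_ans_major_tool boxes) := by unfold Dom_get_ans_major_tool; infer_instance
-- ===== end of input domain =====

-- B replaces A's pipeline (areas list, max(areas), areas.index, re-index) with a stable
-- descending sort by area and taking the head of the ranked list; stability preserves A's
-- first-index tie behaviour. Alternative decomposition, not claimed faster.


-- ===== PORT A =====
def compute_area_bb_tool (xmin1 xmax1 ymin1 ymax1 : Int) : Int :=
  (xmax1 - xmin1) * (ymax1 - ymin1)

-- tuple unpack 'tool, xmin1, xmax1, ymin1, ymax1 = boxes[i]' followed by the call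
def pyArea (b : String × Int × Int × Int × Int) : Int :=
  compute_area_bb_tool b.2.1 b.2.2.1 b.2.2.2.1 b.2.2.2.2

def get_ans_major_tool (boxes : List (String × Int × Int × Int × Int)) : Option String :=
  if PySem.List.len boxes = 1 then
    (PySem.List.pyGet? boxes 0).map (fun b => PySem.Str.lower b.1)
  else if PySem.List.len boxes > 1 then
    let areas : List Int :=
      (PySem.List.pyRange 0 (PySem.List.len boxes)).foldl
        (fun acc i => acc ++ [pyArea (PySem.List.pyGetD boxes i ("", 0, 0, 0, 0))]) []
    match PySem.List.max? areas (fun y => y) with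
    | none => none
    | some m =>
      match PySem.List.index? areas m with
      | none => none
      | some index_max_area =>
        (PySem.List.pyGet? boxes (index_max_area : Int)).map (fun b => PySem.Str.lower b.1)
  else none

-- ===== PORT B =====
def get_ans_major_tool_alt (boxes : List (String × Int × Int × Int × Int)) : Option String :=
  if boxes.isEmpty then none
  else
    let ranked := PySem.List.sorted boxes
      (fun b => (b.2.2.1 - b.2.1) * (b.2.2.2.2 - b.2.2.2.1)) true
    (PySem.List.pyGet? ranked 0).map (fun b => PySem.Str.lower b.1)

-- ===== PRECONDITION & SPEC =====
def Spec_get_ans_major_tool (boxes : List (String × Int × Int × Int × Int)) (out : Option String) : Prop := out = get_ans_major_tool_alt boxes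
instance (boxes : List (String × Int × Int × Int × Int)) (out : Option String) : Decidable (Spec_get_ans_major_tool boxes out) := by unfold Spec_get_ans_major_tool; infer_instance

-- ===== CLAIM (what is proved, stated in full; the proofs are below) =====
def Claim_equal_get_ans_major_tool : Prop := ∀ (boxes : List (String × Int × Int × Int × Int)), Dom_get_ans_major_tool boxes → Spec_get_ans_major_tool boxes (get_ans_major_tool boxes)

-- ===== LEMMAS AND PROOFS =====

-- the running "first strict max" (replace only on strictly larger key)
def runMax {α : Type} (f : α → Int) (m : α) (t : List α) : α :=
  t.foldl (fun m0 x => if f m0 < f x then x else m0) m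

-- the head of the stable reverse insertion-sort fold is exactly runMax
theorem foldl_insertBy_head {α : Type} (f : α → Int) :
    ∀ (t : List α) (m : α) (rest : List α), ∃ rest',
      t.foldl (fun acc x => PySem.List.insertBy (fun a b => decide (f b < f a)) x acc) (m :: rest)
        = runMax f m t :: rest' := by
  intro t
  induction t with
  | nil => exact fun m rest => ⟨rest, rfl⟩
  | cons x ts ih =>
    intro m rest
    by_cases h : f m < f x
    · obtain ⟨rest', hr⟩ := ih x (m :: rest)
      exact ⟨rest', by simpa [PySem.List.insertBy, h, runMax] using hr⟩
    · obtain ⟨rest', hr⟩ :=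
        ih m (PySem.List.insertBy (fun a b => decide (f b < f a)) x rest)
      exact ⟨rest', by simpa [PySem.List.insertBy, h, runMax] using hr⟩

-- runMax splits the list at the FIRST element attaining the maximum of the key
theorem runMax_decomp {α : Type} (f : α → Int) :
    ∀ (t : List α) (m : α), ∃ pre suf,
      m :: t = pre ++ runMax f m t :: suf ∧
      (∀ y ∈ pre, f y < f (runMax f m t)) ∧
      (∀ y ∈ m :: t, f y ≤ f (runMax f m t)) := by
  intro t
  induction t with
  | nil => exact fun m => ⟨[], [], rfl, by simp, by simp [runMax]⟩
  | cons x ts ih =>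
    intro m
    by_cases h : f m < f x
    · obtain ⟨pre, suf, h2, h3, h4⟩ := ih x
      have hrm : runMax f m (x :: ts) = runMax f x ts := by simp [runMax, h]
      have hx : f x ≤ f (runMax f x ts) := h4 x (by simp)
      refine ⟨m :: pre, suf, ?_, ?_, ?_⟩
      · rw [hrm]; simp [h2]
      · intro y hy
        rcases List.mem_cons.1 hy with rfl | hy
        · rw [hrm]; exact lt_of_lt_of_le h hx
        · rw [hrm]; exact h3 y hy
      · intro y hy
        rw [hrm]
        rcases List.mem_cons.1 hy with rfl | hy
        · exact le_of_lt (lt_of_lt_of_le h hx)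
        · exact h4 y hy
    · obtain ⟨pre, suf, h2, h3, h4⟩ := ih m
      have hxm : f x ≤ f m := not_lt.mp h
      have hrm : runMax f m (x :: ts) = runMax f m ts := by simp [runMax, h]
      cases pre with
      | nil =>
        obtain ⟨h2a, h2b⟩ : m = runMax f m ts ∧ ts = suf := by
          simpa using h2
        have hrm2 : runMax f m (x :: ts) = m := by rw [hrm, ← h2a]
        refine ⟨[], x :: ts, by rw [hrm2]; simp, by simp, ?_⟩
        intro y hy
        rw [hrm2]
        rcases List.mem_cons.1 hy with rfl | hy
        · exact le_refl _
        · rcases List.mem_cons.1 hy with rfl | hy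
          · exact hxm
          · exact le_trans (h4 y (by simp [hy])) (le_of_eq (congrArg f h2a.symm))
      | cons p pre'' =>
        have h2' := h2
        simp only [List.cons_append, List.cons.injEq] at h2'
        obtain ⟨h2a, h2b⟩ := h2'
        subst h2a
        have hm' : f m < f (runMax f m ts) := h3 m (by simp)
        refine ⟨m :: x :: pre'', suf, ?_, ?_, ?_⟩
        · rw [hrm]; simp only [List.cons_append]
          exact congrArg (fun l => m :: x :: l) h2b
        · intro y hy
          rw [hrm]
          rcases List.mem_cons.1 hy with rfl | hy
          · exact hm'
          · rcases List.mem_cons.1 hy with rfl | hy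
            · exact lt_of_le_of_lt hxm hm'
            · exact h3 y (by simp [hy])
        · intro y hy
          rw [hrm]
          rcases List.mem_cons.1 hy with rfl | hy
          · exact h4 y (by simp)
          · rcases List.mem_cons.1 hy with rfl | hy
            · exact le_trans hxm (le_of_lt hm')
            · exact h4 y (by simp [hy])

theorem ports_agree (boxes : List (String × Int × Int × Int × Int)) :
    get_ans_major_tool boxes = get_ans_major_tool_alt boxes := by
  match boxes with
  | [] => rfl
  | [a] =>
    simp [get_ans_major_tool, get_ans_major_tool_alt, PySem.List.len, PySem.List.sorted,
      PySem.List.insertBy, PySem.List.pyGet?, PySem.List.pyIdx?]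
  | a :: b :: t =>
    set m' := runMax pyArea a (b :: t) with hm'def
    obtain ⟨pre, suf, h2, h3, h4⟩ := runMax_decomp pyArea (b :: t) a
    rw [← hm'def] at h2 h3 h4
    -- B's key is pyArea
    have hkey : (fun b : String × Int × Int × Int × Int =>
        (b.2.2.1 - b.2.1) * (b.2.2.2.2 - b.2.2.2.1)) = pyArea := by
      funext x; rfl
    -- B's ranked list has head m'
    obtain ⟨rest', hrank⟩ := foldl_insertBy_head pyArea (b :: t) a []
    have hsorted : PySem.List.sorted (a :: b :: t)
        (fun b : String × Int × Int × Int × Int =>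
          (b.2.2.1 - b.2.1) * (b.2.2.2.2 - b.2.2.2.1)) true = m' :: rest' := by
      rw [hkey, PySem.List.sorted_rev_eq_foldl_insertBy]
      simpa [PySem.List.insertBy, hm'def] using hrank
    have hB : get_ans_major_tool_alt (a :: b :: t) = some (PySem.Str.lower m'.1) := by
      simp only [get_ans_major_tool_alt, List.isEmpty_cons, if_false, hsorted, Bool.false_eq_true]
      simp [PySem.List.pyGet?, PySem.List.pyIdx?]
    -- A's branch conditions
    have hlen1 : ¬ (PySem.List.len (a :: b :: t) = 1) := by
      simp [PySem.List.len]; omega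
    have hlen2 : PySem.List.len (a :: b :: t) > 1 := by
      simp [PySem.List.len]
    -- the areas loop builds the map of pyArea
    have hloop : ((PySem.List.pyRange 0 (PySem.List.len (a :: b :: t))).foldl
        (fun acc i => acc ++ [pyArea (PySem.List.pyGetD (a :: b :: t) i ("", 0, 0, 0, 0))]) [])
        = (a :: b :: t).map pyArea := by
      rw [PySem.List.foldl_pyRange_pyGetD (a :: b :: t) ("", 0, 0, 0, 0)
        (fun acc x => acc ++ [pyArea x]) [] (le_refl 0)]
      simp only [Int.toNat_zero, List.drop_zero]
      rw [PySem.List.foldl_append_singleton_eq_map]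
      simp
    set areas := (a :: b :: t).map pyArea with hareas
    -- max(areas) = pyArea m'
    have hmem : m' ∈ a :: b :: t := by rw [h2]; simp
    obtain ⟨M, hM⟩ : ∃ M, PySem.List.max? areas (fun y => y) = some M := by
      cases hM : PySem.List.max? areas (fun y => y) with
      | none => exact absurd ((PySem.List.max?_eq_none_iff _ _).1 hM) (by simp [hareas])
      | some M => exact ⟨M, rfl⟩
    have hMval : M = pyArea m' := by
      have hle : pyArea m' ≤ M :=
        PySem.List.max?_isMax hM (pyArea m') (by rw [hareas]; exact List.mem_map_of_mem hmem)
      have hmemM : M ∈ areas := PySem.List.max?_mem hM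
      rw [hareas] at hmemM
      obtain ⟨y, hy, rfl⟩ := List.mem_map.1 hmemM
      exact le_antisymm (h4 y hy) hle
    -- index of the max is pre.length
    have hidx : PySem.List.index? areas M = some pre.length := by
      rw [hMval, PySem.List.index?_eq_some_iff]
      refine ⟨pre.map pyArea, suf.map pyArea, ?_, by simp, ?_⟩
      · rw [hareas, h2]; simp
      · intro hc
        obtain ⟨y, hy, hyeq⟩ := List.mem_map.1 hc
        exact absurd hyeq (ne_of_lt (h3 y hy))
    -- boxes[pre.length] = m'
    have hget : PySem.List.pyGet? (a :: b :: t) ((pre.length : Nat) : Int) = some m' := by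
      rw [PySem.List.pyGet?_natCast, h2]
      simp
    -- assemble A
    rw [get_ans_major_tool]
    simp only [hlen1, if_false, hlen2, if_true, hloop, hM, hidx, hget, Option.map_some, hB]

-- ===== VERDICT (by name: the statement is the Claim_ definition above) =====
theorem get_ans_major_tool_spec : Claim_equal_get_ans_major_tool := by
  intro boxes _
  exact ports_agree boxes
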